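-- pv_equiv track=rewrite | github.com/Hamooud92/Hamoud | udemy08.py | match_S
-- ===== SOURCE A (Python) =====
-- def match_S(a,b):
--     shorter=min(len(a),len(b))
--     count=0
--     for i in range(shorter-1):
--         a_sub=a[i:i+2]
--         b_sub=b[i:i+2]
--         if a_sub==b_sub:
--             count=count+1
--     return count
-- ===== SOURCE B (Python) =====
-- def match_S(a, b):
--     n = min(len(a), len(b))
--     total = 0
--     i = 0
--     while i < n:
--         if a[i] == b[i]:
--             j = i + 1
--             while j < n and a[j] == b[j]:
--                 j += 1
--             total += j - i - 1
--             i = j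
--         else:
--             i += 1
--     return total
-- ===== Notes on version B (the rewrite author's own statement) =====
-- stated objective: alternative
-- what changed: Replaces per-index 2-char slice comparisons with a nested-loop run-length scan that skips to the end of each maximal run of matching positions and adds run_length-1 per run.
import Mathlib
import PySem

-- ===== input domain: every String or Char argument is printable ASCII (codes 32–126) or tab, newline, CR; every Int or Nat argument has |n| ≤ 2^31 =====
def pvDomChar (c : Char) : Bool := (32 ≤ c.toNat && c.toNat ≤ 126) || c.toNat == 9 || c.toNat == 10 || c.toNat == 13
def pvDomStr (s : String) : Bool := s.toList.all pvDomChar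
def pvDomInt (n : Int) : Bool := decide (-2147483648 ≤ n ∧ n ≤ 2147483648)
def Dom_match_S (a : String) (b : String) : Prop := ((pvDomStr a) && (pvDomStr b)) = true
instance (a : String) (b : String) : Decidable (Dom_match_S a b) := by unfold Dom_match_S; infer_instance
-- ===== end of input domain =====

-- B replaces A's per-index 2-char slice comparisons with a nested-loop run-length
-- scan: it skips to the end of each maximal run of matching positions and adds
-- run_length - 1 per run (alternative decomposition; same O(n)).

-- ===== PORT A =====
def match_S (a : String) (b : String) : Int :=
  let shorter : Int := min (PySem.Str.len a) (PySem.Str.len b)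
  (PySem.List.pyRange 0 (shorter - 1) 1).foldl
    (fun count i =>
      let a_sub := PySem.Str.slice a (some i) (some (i + 2))
      let b_sub := PySem.Str.slice b (some i) (some (i + 2))
      if a_sub = b_sub then count + 1 else count) 0

-- ===== PORT B =====
-- inner `while j < n and a[j] == b[j]: j += 1` of Source B
-- (indexing a[j]/b[j] is always in range in Source B, so getD is exact here)
def pvRunEnd (la lb : List Char) (n j : Nat) : Nat :=
  if h : j < n ∧ la.getD j default = lb.getD j default then
    pvRunEnd la lb n (j + 1)
  else j
termination_by n - j
decreasing_by omega

lemma pvRunEnd_ge (la lb : List Char) (n j : Nat) : j ≤ pvRunEnd la lb n j := by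
  unfold pvRunEnd
  split
  · have := pvRunEnd_ge la lb n (j + 1); omega
  · exact le_rfl
termination_by n - j
decreasing_by omega

-- outer `while i < n` of Source B
def pvScan (la lb : List Char) (n i : Nat) (total : Int) : Int :=
  if _h : i < n then
    if la.getD i default = lb.getD i default then
      let j := pvRunEnd la lb n (i + 1)
      pvScan la lb n j (total + ((j : Int) - (i : Int) - 1))
    else
      pvScan la lb n (i + 1) total
  else total
termination_by n - i
decreasing_by
  · have := pvRunEnd_ge la lb n (i + 1); omega
  · omega

def match_S_alt (a : String) (b : String) : Int :=
  pvScan a.toList b.toList (min a.toList.length b.toList.length) 0 0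

-- ===== PRECONDITION & SPEC =====
def Spec_match_S (a : String) (b : String) (out : Int) : Prop := out = match_S_alt a b
instance (a : String) (b : String) (out : Int) : Decidable (Spec_match_S a b out) := by unfold Spec_match_S; infer_instance

-- ===== CLAIM (what is proved, stated in full; the proofs are below) =====
def Claim_equal_match_S : Prop := ∀ (a : String) (b : String), Dom_match_S a b → Spec_match_S a b (match_S a b)

-- ===== LEMMAS AND PROOFS =====

-- per-position match predicate
def pvM (la lb : List Char) (k : Nat) : Bool := la.getD k default == lb.getD k default

-- pairs still to be counted from index i on: k ∈ [i, n-1) with M k ∧ M (k+1)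
def pvPairs (la lb : List Char) (n i : Nat) : Nat :=
  (List.range' i (n - 1 - i)).countP (fun k => pvM la lb k && pvM la lb (k + 1))

lemma pvRunEnd_le (la lb : List Char) (n j : Nat) (hj : j ≤ n) :
    pvRunEnd la lb n j ≤ n := by
  unfold pvRunEnd
  split
  · next h => exact pvRunEnd_le la lb n (j + 1) (by omega)
  · exact hj
termination_by n - j
decreasing_by omega

lemma pvRunEnd_mem (la lb : List Char) (n j : Nat) :
    ∀ k, j ≤ k → k < pvRunEnd la lb n j → pvM la lb k = true := by
  unfold pvRunEnd
  split
  · next h =>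
    intro k hk1 hk2
    rcases Nat.eq_or_lt_of_le hk1 with rfl | hlt
    · simpa [pvM] using h.2
    · exact pvRunEnd_mem la lb n (j + 1) k hlt hk2
  · intro k hk1 hk2; omega
termination_by n - j
decreasing_by omega

lemma pvRunEnd_stop (la lb : List Char) (n j : Nat) (hj : j ≤ n) :
    pvRunEnd la lb n j = n ∨ pvM la lb (pvRunEnd la lb n j) = false := by
  unfold pvRunEnd
  split
  · next h => exact pvRunEnd_stop la lb n (j + 1) (by omega)
  · next h =>
    by_cases hjn : j < n
    · right
      simp only [not_and] at h
      simp only [pvM]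
      simpa using h hjn
    · left; omega
termination_by n - j
decreasing_by omega

-- run decomposition of the pair count
lemma pvPairs_run (la lb : List Char) (n i j : Nat) (hi : i < n)
    (hm : pvM la lb i = true) (h1 : i + 1 ≤ j) (h2 : j ≤ n)
    (hrun : ∀ k, i + 1 ≤ k → k < j → pvM la lb k = true)
    (hstop : j = n ∨ pvM la lb j = false) :
    pvPairs la lb n i = (j - i - 1) + pvPairs la lb n j := by
  have hM : ∀ k, i ≤ k → k < j → pvM la lb k = true := by
    intro k hk1 hk2
    rcases Nat.eq_or_lt_of_le hk1 with rfl | hlt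
    · exact hm
    · exact hrun k hlt hk2
  by_cases hjn : j = n
  · have h0 : pvPairs la lb n j = 0 := by
      unfold pvPairs
      have : n - 1 - j = 0 := by omega
      simp [this]
    rw [h0]
    unfold pvPairs
    rw [List.countP_eq_length.mpr]
    · rw [List.length_range']; omega
    · intro k hk
      rw [List.mem_range'_1] at hk
      have hk2 : k < n - 1 := by omega
      simp only [Bool.and_eq_true]
      exact ⟨hM k hk.1 (by omega), hM (k + 1) (by omega) (by omega)⟩
  · have hjlt : j < n := by omega
    have hMj : pvM la lb j = false := by tauto
    unfold pvPairs
    have hsplit : List.range' i (n - 1 - i)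
        = List.range' i (j - 1 - i) ++ List.range' (j - 1) 1 ++ List.range' j (n - 1 - j) := by
      have e1 : List.range' i ((j - 1 - i) + 1) = List.range' i (j - 1 - i) ++ List.range' (i + (j - 1 - i)) 1 := by
        have := @List.range'_append i (j - 1 - i) 1 1
        simpa using this.symm
      have e2 : List.range' i (((j - 1 - i) + 1) + (n - 1 - j)) = List.range' i ((j - 1 - i) + 1) ++ List.range' (i + ((j - 1 - i) + 1)) (n - 1 - j) := by
        have := @List.range'_append i ((j - 1 - i) + 1) (n - 1 - j) 1
        simpa using this.symm
      have hn1 : n - 1 - i = ((j - 1 - i) + 1) + (n - 1 - j) := by omega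
      have ha1 : i + (j - 1 - i) = j - 1 := by omega
      have ha2 : i + ((j - 1 - i) + 1) = j := by omega
      rw [hn1, e2, e1, ha1, ha2]
    rw [hsplit, List.countP_append, List.countP_append]
    have c1 : (List.range' i (j - 1 - i)).countP (fun k => pvM la lb k && pvM la lb (k + 1))
        = j - 1 - i := by
      rw [List.countP_eq_length.mpr]
      · rw [List.length_range']
      · intro k hk
        rw [List.mem_range'_1] at hk
        simp only [Bool.and_eq_true]
        exact ⟨hM k hk.1 (by omega), hM (k + 1) (by omega) (by omega)⟩
    have c2 : (List.range' (j - 1) 1).countP (fun k => pvM la lb k && pvM la lb (k + 1)) = 0 := by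
      have hj1 : j - 1 + 1 = j := by omega
      simp [List.range', hj1, hMj]
    rw [c1, c2]
    omega

-- main invariant: the scan adds exactly the remaining pair count
lemma pvScan_eq (la lb : List Char) (n i : Nat) (total : Int) (hin : i ≤ n) :
    pvScan la lb n i total = total + (pvPairs la lb n i : Int) := by
  unfold pvScan
  split
  · next hi =>
    split
    · next hmc =>
      have hm : pvM la lb i = true := by simpa [pvM] using hmc
      have h1 : i + 1 ≤ pvRunEnd la lb n (i + 1) := pvRunEnd_ge la lb n (i + 1)
      have h2 : pvRunEnd la lb n (i + 1) ≤ n := pvRunEnd_le la lb n (i + 1) (by omega)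
      rw [pvScan_eq la lb n _ _ h2]
      have key := pvPairs_run la lb n i (pvRunEnd la lb n (i + 1)) hi hm h1 h2
        (pvRunEnd_mem la lb n (i + 1)) (pvRunEnd_stop la lb n (i + 1) (by omega))
      rw [key]
      push_cast
      omega
    · next hmc =>
      rw [pvScan_eq la lb n (i + 1) total (by omega)]
      congr 2
      unfold pvPairs
      by_cases hi1 : i < n - 1
      · have : n - 1 - i = (n - 1 - (i + 1)) + 1 := by omega
        rw [this, List.range'_succ, List.countP_cons]
        have : pvM la lb i = false := by
          simpa [pvM] using hmc
        simp [this]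
      · have e1 : n - 1 - i = 0 := by omega
        have e2 : n - 1 - (i + 1) = 0 := by omega
        simp [e1, e2]
  · next hi =>
    have : n - 1 - i = 0 := by omega
    unfold pvPairs
    simp [this]
termination_by n - i
decreasing_by
  · omega
  · omega

-- A's predicate on k with k+2 in range is the adjacent-pair condition
lemma pv_slice_pair (la lb : List Char) (k : Nat)
    (hk : k + 2 ≤ la.length) (hk' : k + 2 ≤ lb.length) :
    ((la.drop k).take 2 = (lb.drop k).take 2)
      ↔ (pvM la lb k && pvM la lb (k + 1)) = true := by
  have da : la.drop k = la[k] :: la[k+1] :: la.drop (k + 1 + 1) := by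
    rw [List.drop_eq_getElem_cons (l := la) (by omega : k < la.length)]
    rw [List.drop_eq_getElem_cons (l := la) (by omega : k + 1 < la.length)]
    rfl
  have db : lb.drop k = lb[k] :: lb[k+1] :: lb.drop (k + 1 + 1) := by
    rw [List.drop_eq_getElem_cons (l := lb) (by omega : k < lb.length)]
    rw [List.drop_eq_getElem_cons (l := lb) (by omega : k + 1 < lb.length)]
    rfl
  have ta : (la.drop k).take 2 = [la[k], la[k+1]] := by rw [da]; rfl
  have tb : (lb.drop k).take 2 = [lb[k], lb[k+1]] := by rw [db]; rfl
  have e1 : la[k]? = some la[k] := List.getElem?_eq_getElem (by omega)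
  have e2 : la[k+1]? = some la[k+1] := List.getElem?_eq_getElem (by omega)
  have e3 : lb[k]? = some lb[k] := List.getElem?_eq_getElem (by omega)
  have e4 : lb[k+1]? = some lb[k+1] := List.getElem?_eq_getElem (by omega)
  rw [ta, tb]
  simp [pvM, e1, e2, e3, e4]

-- ===== VERDICT (by name: the statement is the Claim_ definition above) =====
theorem match_S_spec : Claim_equal_match_S := by
  intro a b _
  unfold Spec_match_S match_S match_S_alt
  simp only [PySem.Str.len_eq]
  rw [PySem.List.foldl_ite_add_one, PySem.List.pyRange_one, List.countP_map]
  rw [pvScan_eq a.toList b.toList _ 0 0 (by omega)]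
  have hN : ((min ((a.toList.length : Int)) ((b.toList.length : Int)) - 1) - 0).toNat
      = min a.toList.length b.toList.length - 1 := by omega
  rw [hN]
  have hc : (List.range (min a.toList.length b.toList.length - 1)).countP
      ((fun i => decide (PySem.Str.slice a (some i) (some (i + 2))
          = PySem.Str.slice b (some i) (some (i + 2)))) ∘ fun k : Nat => (0 : Int) + k)
      = (List.range (min a.toList.length b.toList.length - 1)).countP
      (fun k => pvM a.toList b.toList k && pvM a.toList b.toList (k + 1)) := by
    apply List.countP_congr
    intro k hk
    rw [List.mem_range] at hk
    simp only [Function.comp_def, zero_add, decide_eq_true_eq]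
    have h2 : ∀ (l : List Char), PySem.List.slice l (some (k : Int)) (some ((k : Int) + 2))
        = (l.drop k).take 2 := by
      intro l
      have e : ((k : Int) + 2) = ((k : Int) + ((2 : Nat) : Int)) := by norm_num
      rw [e, PySem.List.slice_natCast_add]
    rw [← pv_slice_pair a.toList b.toList k (by omega) (by omega)]
    constructor
    · intro h
      have := congrArg String.toList h
      simpa [PySem.Str.toList_slice, h2] using this
    · intro h
      have : (PySem.Str.slice a (some (k : Int)) (some ((k : Int) + 2))).toList
          = (PySem.Str.slice b (some (k : Int)) (some ((k : Int) + 2))).toList := by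
        simpa [PySem.Str.toList_slice, h2] using h
      exact String.toList_inj.mp this
  rw [hc]
  unfold pvPairs
  rw [List.range_eq_range']
  norm_num
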